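-- pv_equiv track=rewrite | github.com/MoebiusThrip/lyrikenstein | lyrikenstein.py | deconstruct
-- ===== SOURCE A (Python) =====
-- def deconstruct(arrangement):
--     """Deconstruct an arrangement of words into a dictionary of context positions, recording the position of each
--     word compared to all others.
--
--     Arguments:
--         arrangement: list of (number, string) tuples, the position and name of each word in the arrangement
--
--     Returns:
--         list of (string, dict) tuples, the words and context dictionaries of all words in the arrangement
--     """
--
--     # process enumerate objects if necessary
--     arrangement = [(position, word) for position, word in arrangement]
--
--     # compare each word in the arrangement
--     contexts = []
--     for position, word in arrangement:
--
--         # to every other word in the arrangement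
--         record = (word, {})
--         for positionii, wordii in arrangement:
--
--             # exclude entries from the same word
--             if wordii != word:
--
--                 # calculate the distance and add to dictionary
--                 distance = positionii - position
--                 record[1][wordii] = distance
--
--         # add to list of contexts
--         contexts.append(record)
--
--     return contexts
-- ===== SOURCE B (Python) =====
-- def deconstruct(arrangement):
--     """Same result as A, computed in three staged passes: (1) one pass records
--     each distinct word's last-occurrence position; (2) one template context per
--     DISTINCT word is built once (absolute positions of all other words); (3) each
--     occurrence's record is a pure shift of its word's template by -position.
--     Correct because A's record for (position, word) only depends on word (which
--     keys appear, in first-occurrence order, each with its last position) and on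
--     position (a uniform shift)."""
--
--     # process enumerate objects if necessary
--     arrangement = [(position, word) for position, word in arrangement]
--
--     # pass 1: last occurrence position of each distinct word, first-occurrence order
--     last = {}
--     for position, word in arrangement:
--         last[word] = position
--     items = list(last.items())
--
--     # pass 2: one absolute-position template per distinct word
--     templates = {word: [(w, p) for w, p in items if w != word] for word in last}
--
--     # pass 3: each record is the word's template shifted by -position
--     return [(word, {w: p - position for w, p in templates[word]})
--             for position, word in arrangement]
-- ===== Notes on version B (the rewrite author's own statement) =====
-- stated objective: alternative
-- what changed: Replaces A's nested rescan with three staged passes: a last-occurrence table, one context template per DISTINCT word built once, and each occurrence's record produced as a pure shift of its word's template (no per-occurrence scan or filter of the arrangement).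
import Mathlib
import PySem

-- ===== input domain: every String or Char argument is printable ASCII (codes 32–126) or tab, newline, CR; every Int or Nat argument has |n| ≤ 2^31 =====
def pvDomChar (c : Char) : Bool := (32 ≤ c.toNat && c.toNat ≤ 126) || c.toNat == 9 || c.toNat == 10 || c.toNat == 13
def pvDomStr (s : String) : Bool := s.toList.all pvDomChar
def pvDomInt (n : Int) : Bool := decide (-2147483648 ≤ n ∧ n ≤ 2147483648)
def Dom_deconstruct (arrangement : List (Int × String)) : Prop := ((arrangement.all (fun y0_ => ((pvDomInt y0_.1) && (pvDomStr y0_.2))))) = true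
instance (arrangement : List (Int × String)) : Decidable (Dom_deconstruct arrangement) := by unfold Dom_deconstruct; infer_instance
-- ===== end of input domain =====

-- B replaces A's per-occurrence rescan by staged passes: a last-occurrence table, one template per distinct word, and per-occurrence records as pure shifts of the templates (objective: alternative).


-- ===== PORT A =====
def deconstruct (arrangement : List (Int × String)) : List (String × (List (String × Int))) :=
  -- arrangement = [(position, word) for position, word in arrangement]
  let arr := arrangement.map (fun pw => (pw.1, pw.2))
  -- outer loop: one record appended per (position, word)
  arr.foldl (fun contexts pw =>
    -- record = (word, {}), filled by the inner loop over every entry with a different word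
    let record : String × PySem.Dict String Int :=
      (pw.2, arr.foldl (fun d qw =>
        if qw.2 ≠ pw.2 then d.insert qw.2 (qw.1 - pw.1) else d) PySem.Dict.empty)
    contexts ++ [(record.1, record.2.items)]) []

-- ===== PORT B =====
def deconstruct_alt (arrangement : List (Int × String)) : List (String × (List (String × Int))) :=
  -- arrangement = [(position, word) for position, word in arrangement]
  let arr := arrangement.map (fun pw => (pw.1, pw.2))
  -- pass 1: last occurrence position of each distinct word, first-occurrence order
  let last := arr.foldl (fun d pw => d.insert pw.2 pw.1) PySem.Dict.empty
  let items := last.items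
  -- pass 2: one absolute-position template per distinct word
  let templates : PySem.Dict String (List (String × Int)) :=
    last.keys.foldl (fun t word =>
      t.insert word (items.filter (fun wp => wp.1 ≠ word))) PySem.Dict.empty
  -- pass 3: each record is the word's template shifted by -position
  arr.map (fun pw =>
    (pw.2, ((templates.getD pw.2 []).foldl (fun d wp =>
      d.insert wp.1 (wp.2 - pw.1)) PySem.Dict.empty).items))

-- ===== PRECONDITION & SPEC =====
def Spec_deconstruct (arrangement : List (Int × String)) (out : List (String × (List (String × Int)))) : Prop := out = deconstruct_alt arrangement
instance (arrangement : List (Int × String)) (out : List (String × (List (String × Int)))) : Decidable (Spec_deconstruct arrangement out) := by unfold Spec_deconstruct; infer_instance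

-- ===== CLAIM (what is proved, stated in full; the proofs are below) =====
def Claim_equal_deconstruct : Prop := ∀ (arrangement : List (Int × String)), Dom_deconstruct arrangement → Spec_deconstruct arrangement (deconstruct arrangement)

-- ===== LEMMAS AND PROOFS =====

-- the common canonical form of one context record: shift the last-occurrence
-- table's values by -pos and drop the word's own entry
def pvShift (pos : Int) (wp : String × Int) : String × Int := (wp.1, wp.2 - pos)

def pvFS (word : String) (pos : Int) (L : List (String × Int)) : List (String × Int) :=
  (L.filter (fun wp => wp.1 ≠ word)).map (pvShift pos)

-- filter (≠ word) absorbs an in-place replacement at key word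
theorem fs_rep_word (L : List (String × Int)) (p pos : Int) (word : String) :
    pvFS word pos (L.map (fun q => if (q.1 == word) = true then (word, p) else q)) = pvFS word pos L := by
  induction L with
  | nil => rfl
  | cons a t ih =>
    simp only [pvFS, List.map_cons, List.filter_cons] at ih ⊢
    by_cases h : a.1 = word <;> simp_all [pvShift]

-- pvFS commutes with an in-place replacement at a key w ≠ word
theorem fs_rep_ne (L : List (String × Int)) (p pos : Int) (w word : String) (hw : w ≠ word) :
    pvFS word pos (L.map (fun q => if (q.1 == w) = true then (w, p) else q))
      = (pvFS word pos L).map (fun q => if (q.1 == w) = true then (w, p - pos) else q) := by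
  have hws : ¬ word = w := fun e => hw e.symm
  induction L with
  | nil => rfl
  | cons a t ih =>
    simp only [pvFS, List.map_cons, List.filter_cons] at ih ⊢
    by_cases h : a.1 = w
    · simp_all [pvShift]
    · by_cases h2 : a.1 = word <;> simp_all [pvShift]

-- pvFS commutes with appending a fresh pair at a key w ≠ word
theorem fs_append (L : List (String × Int)) (p pos : Int) (w word : String) (hw : w ≠ word) :
    pvFS word pos (L ++ [(w, p)]) = pvFS word pos L ++ [(w, p - pos)] := by
  simp [pvFS, List.filter_append, hw, pvShift]

-- key membership at w ≠ word is unchanged by pvFS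
theorem any_fs (L : List (String × Int)) (pos : Int) (w word : String) (hw : w ≠ word) :
    ((pvFS word pos L).any fun q => q.1 == w) = (L.any fun q => q.1 == w) := by
  have hws : ¬ word = w := fun e => hw e.symm
  induction L with
  | nil => rfl
  | cons a t ih =>
    simp only [pvFS, List.filter_cons] at ih ⊢
    by_cases h2 : a.1 = word
    · simp_all [pvShift]
    · by_cases h : a.1 = w <;> simp_all [pvShift]

-- one step of A's inner loop, seen through pvFS of the growing last-occurrence table
theorem stepK (d' : PySem.Dict String Int) (p pos : Int) (w word : String) :
    (if w ≠ word then (PySem.Dict.mk (pvFS word pos d'.items)).insert w (p - pos)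
     else PySem.Dict.mk (pvFS word pos d'.items))
    = PySem.Dict.mk (pvFS word pos (d'.insert w p).items) := by
  by_cases hw : w = word
  · subst hw
    simp only [ne_eq, not_true_eq_false, if_false]
    apply PySem.Dict.ext
    rcases hc : d'.contains w with hfalse | htrue
    · rw [PySem.Dict.items_insert_of_not_contains d' p hc]
      simp [pvFS, List.filter_append]
    · rw [PySem.Dict.items_insert_of_contains d' p hc, fs_rep_word]
  · simp only [ne_eq, hw, not_false_eq_true, if_true]
    apply PySem.Dict.ext
    have hmk : ∀ (b : Bool), d'.contains w = b →
        (PySem.Dict.mk (pvFS word pos d'.items)).contains w = b := by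
      intro b hb
      rw [PySem.Dict.contains_mk, any_fs _ _ _ _ hw]
      have h2 := PySem.Dict.contains_mk d'.items w
      have hd : d' = PySem.Dict.mk d'.items := rfl
      rw [hd] at hb
      rw [h2] at hb
      exact hb
    rcases hc : d'.contains w with hfalse | htrue
    · rw [PySem.Dict.items_insert_of_not_contains _ (p - pos) (hmk false hc),
          PySem.Dict.items_insert_of_not_contains d' p hc, fs_append _ _ _ _ _ hw]
    · rw [PySem.Dict.items_insert_of_contains _ (p - pos) (hmk true hc),
          PySem.Dict.items_insert_of_contains d' p hc, fs_rep_ne _ _ _ _ _ hw]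

-- A's inner loop equals pvFS of the last-occurrence table of the same list
theorem innerA_eq (xs : List (Int × String)) (pos : Int) (word : String) (d' : PySem.Dict String Int) :
    xs.foldl (fun d qw => if qw.2 ≠ word then d.insert qw.2 (qw.1 - pos) else d)
        (PySem.Dict.mk (pvFS word pos d'.items))
      = PySem.Dict.mk (pvFS word pos (xs.foldl (fun d pw => d.insert pw.2 pw.1) d').items) := by
  induction xs generalizing d' with
  | nil => rfl
  | cons x t ih =>
    simp only [List.foldl_cons]
    rw [stepK d' x.1 pos x.2 word]
    exact ih (d'.insert x.2 x.1)

theorem innerA_empty (xs : List (Int × String)) (pos : Int) (word : String) :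
    (xs.foldl (fun d qw => if qw.2 ≠ word then d.insert qw.2 (qw.1 - pos) else d)
        PySem.Dict.empty).items
      = pvFS word pos (xs.foldl (fun d pw => d.insert pw.2 pw.1) PySem.Dict.empty).items := by
  have h := innerA_eq xs pos word PySem.Dict.empty
  have h0 : (PySem.Dict.mk (pvFS word pos (PySem.Dict.empty : PySem.Dict String Int).items))
      = (PySem.Dict.empty : PySem.Dict String Int) := rfl
  rw [h0] at h
  rw [h]

-- B's pass-2 templates dict: looked up at a key of the table, it returns that key's filtered template
theorem templates_getD (items : List (String × Int)) (keys : List String)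
    (hnd : keys.Nodup) (word : String) (hmem : word ∈ keys) :
    (keys.foldl (fun t word =>
        t.insert word (items.filter (fun wp => wp.1 ≠ word))) PySem.Dict.empty).getD word []
      = items.filter (fun wp => wp.1 ≠ word) := by
  have hfresh := PySem.Dict.items_foldl_insert_fresh keys
      (fun w : String => w) (fun w : String => items.filter (fun wp => wp.1 ≠ w))
      PySem.Dict.empty (fun a _ => by simp [PySem.Dict.contains_empty]) (by simpa using hnd)
  have hknd : ((keys.foldl (fun t word =>
        t.insert word (items.filter (fun wp => wp.1 ≠ word))) PySem.Dict.empty).keys).Nodup :=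
    PySem.Dict.nodup_keys_foldl_insert_key keys (fun w => w) _ PySem.Dict.empty
      PySem.Dict.nodup_keys_empty
  have hmem2 : (word, items.filter (fun wp => wp.1 ≠ word)) ∈
      (keys.foldl (fun d a => d.insert ((fun w : String => w) a)
        ((fun w => items.filter (fun wp => wp.1 ≠ w)) a)) PySem.Dict.empty).items := by
    rw [hfresh]
    simp only [PySem.Dict.empty, List.nil_append]
    exact List.mem_map.2 ⟨word, hmem, rfl⟩
  exact PySem.Dict.getD_of_mem_items _ hmem2 hknd []

-- B's pass-3 dict comprehension over a key-nodup template equals pvFS of the table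
theorem innerB_eq (items : List (String × Int)) (pos : Int) (word : String)
    (hnd : (items.map (·.1)).Nodup) :
    ((items.filter (fun wp => wp.1 ≠ word)).foldl (fun d wp =>
        d.insert wp.1 (wp.2 - pos)) PySem.Dict.empty).items = pvFS word pos items := by
  have hnd2 : (((items.filter (fun wp => wp.1 ≠ word)).map (fun wp : String × Int => wp.1)).Nodup) := by
    refine List.Nodup.sublist ?_ hnd
    exact List.Sublist.map _ List.filter_sublist
  have hfresh := PySem.Dict.items_foldl_insert_fresh (items.filter (fun wp => wp.1 ≠ word))
      (fun wp : String × Int => wp.1) (fun wp : String × Int => wp.2 - pos) PySem.Dict.empty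
      (fun a _ => by simp [PySem.Dict.contains_empty]) hnd2
  rw [hfresh]
  simp [pvFS, pvShift, PySem.Dict.empty]

theorem deconstruct_eq (arrangement : List (Int × String)) :
    deconstruct arrangement = deconstruct_alt arrangement := by
  unfold deconstruct deconstruct_alt
  simp only [PySem.List.foldl_append_singleton_eq_map, List.nil_append]
  apply List.map_congr_left
  intro pw hpw
  set arr := arrangement.map (fun pw => (pw.1, pw.2)) with harr
  set last := arr.foldl (fun d pw => d.insert pw.2 pw.1) PySem.Dict.empty with hlast
  have hknd : last.keys.Nodup :=
    PySem.Dict.nodup_keys_foldl_insert_key arr (fun pw : Int × String => pw.2)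
      (fun _ pw => pw.1) PySem.Dict.empty PySem.Dict.nodup_keys_empty
  have hind : (last.items.map (·.1)).Nodup := by
    simpa [PySem.Dict.keys] using hknd
  have hmem : pw.2 ∈ last.keys := by
    rw [hlast, PySem.Dict.keys_foldl_insert_key arr (fun pw : Int × String => pw.2)]
    simp only [PySem.Dict.keys_empty]
    have : pw.2 ∈ arr.map (fun pw : Int × String => pw.2) := List.mem_map.2 ⟨pw, hpw, rfl⟩
    simpa [PySem.Set.update, PySem.Set.ofList_eq_foldl] using
      (PySem.Set.mem_ofList (arr.map (fun pw : Int × String => pw.2)) pw.2).2 this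
  rw [templates_getD last.items last.keys hknd pw.2 hmem,
      innerB_eq last.items pw.1 pw.2 hind, innerA_empty]

-- ===== VERDICT (by name: the statement is the Claim_ definition above) =====
theorem deconstruct_spec : Claim_equal_deconstruct := by
  intro arrangement _
  exact deconstruct_eq arrangement
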